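-- pv_equiv track=rewrite | github.com/cszetino/ATSDroneTraffic | animation.py | _action_text_at_time
-- ===== SOURCE A (Python) =====
-- def _action_text_at_time(action_map, time_value):
--     actions = action_map.get(time_value, [])
--     messages = []
--
--     for action in actions:
--         target = action.get("target", "?")
--         act = action.get("action", "").upper()
--         row = action.get("right_of_way")
--
--         if row:
--             messages.append(f"{target} -> {act} | ROW={row}")
--         else:
--             messages.append(f"{target} -> {act}")
--
--     if not messages:
--         return "Decision: No action"
--
--     if len(messages) > 2:
--         return "Decision: " + " | ".join(messages[:2]) + f" | +{len(messages) - 2} more"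
--
--     return "Decision: " + " | ".join(messages)
-- ===== SOURCE B (Python) =====
-- def _fmt(action):
--     target = action.get("target", "?")
--     act = action.get("action", "").upper()
--     row = action.get("right_of_way")
--     if row:
--         return f"{target} -> {act} | ROW={row}"
--     return f"{target} -> {act}"
--
--
-- def _action_text_at_time(action_map, time_value):
--     match action_map.get(time_value, []):
--         case []:
--             return "Decision: No action"
--         case [a]:
--             return f"Decision: {_fmt(a)}"
--         case [a, b]:
--             return f"Decision: {_fmt(a)} | {_fmt(b)}"
--         case [a, b, *rest]:
--             return f"Decision: {_fmt(a)} | {_fmt(b)} | +{len(rest)} more"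
-- ===== Notes on version B (the rewrite author's own statement) =====
-- stated objective: idiomatic
-- what changed: B replaces A's accumulate-all-messages loop + join + slice/truncation arithmetic by direct structural pattern matching on the action list ([], [a], [a,b], [a,b,*rest]), concatenating at most two formatted messages and taking the overflow count as len(rest).
import Mathlib
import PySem

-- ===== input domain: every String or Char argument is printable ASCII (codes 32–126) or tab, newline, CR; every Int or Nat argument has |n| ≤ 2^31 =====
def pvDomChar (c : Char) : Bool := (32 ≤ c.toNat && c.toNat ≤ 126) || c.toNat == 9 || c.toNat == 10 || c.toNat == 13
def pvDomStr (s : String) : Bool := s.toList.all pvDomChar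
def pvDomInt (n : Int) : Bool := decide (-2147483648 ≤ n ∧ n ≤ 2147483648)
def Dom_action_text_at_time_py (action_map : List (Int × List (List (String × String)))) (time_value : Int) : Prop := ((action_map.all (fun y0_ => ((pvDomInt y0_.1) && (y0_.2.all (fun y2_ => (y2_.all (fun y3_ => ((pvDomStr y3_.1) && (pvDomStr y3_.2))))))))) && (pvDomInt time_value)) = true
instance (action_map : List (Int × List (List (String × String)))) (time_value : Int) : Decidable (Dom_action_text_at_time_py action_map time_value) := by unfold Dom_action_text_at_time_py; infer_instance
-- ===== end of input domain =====

-- B replaces A's accumulate-all-messages loop + join + truncation arithmetic by direct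
-- structural pattern matching on the action list (objective: idiomatic).
-- dict lookup (first match in an association list)
def pvLookup {κ ν : Type} [BEq κ] (xs : List (κ × ν)) (k : κ) : Option ν :=
  (xs.find? (fun p => p.1 == k)).map (·.2)

-- ===== PORT A =====
def action_text_at_time_py (action_map : List (Int × List (List (String × String)))) (time_value : Int) : String :=
  let actions := (pvLookup action_map time_value).getD []
  let messages := actions.foldl (fun msgs action =>
    let target := (pvLookup action "target").getD "?"
    let act := PySem.Str.upper ((pvLookup action "action").getD "")
    let row := pvLookup action "right_of_way"
    match row with
    | some r =>
        if r ≠ "" then msgs ++ [target ++ " -> " ++ act ++ " | ROW=" ++ r]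
        else msgs ++ [target ++ " -> " ++ act]
    | none => msgs ++ [target ++ " -> " ++ act]) []
  if messages = [] then "Decision: No action"
  else if messages.length > 2 then
    "Decision: " ++ PySem.Str.join " | " (PySem.List.slice messages none (some 2)) ++
      " | +" ++ PySem.Int.toStr ((messages.length : Int) - 2) ++ " more"
  else "Decision: " ++ PySem.Str.join " | " messages

-- ===== PORT B =====
-- B's helper _fmt
def pvFmtB (action : List (String × String)) : String :=
  let target := (pvLookup action "target").getD "?"
  let act := PySem.Str.upper ((pvLookup action "action").getD "")
  let row := pvLookup action "right_of_way"
  match row with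
  | some r =>
      if r ≠ "" then target ++ " -> " ++ act ++ " | ROW=" ++ r
      else target ++ " -> " ++ act
  | none => target ++ " -> " ++ act

def action_text_at_time_py_alt (action_map : List (Int × List (List (String × String)))) (time_value : Int) : String :=
  match (pvLookup action_map time_value).getD [] with
  | [] => "Decision: No action"
  | [a] => "Decision: " ++ pvFmtB a
  | [a, b] => "Decision: " ++ pvFmtB a ++ " | " ++ pvFmtB b
  | a :: b :: rest =>
      "Decision: " ++ pvFmtB a ++ " | " ++ pvFmtB b ++ " | +" ++
        PySem.Int.toStr (rest.length : Int) ++ " more"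

-- ===== PRECONDITION & SPEC =====
def Spec_action_text_at_time_py (action_map : List (Int × List (List (String × String)))) (time_value : Int) (out : String) : Prop := out = action_text_at_time_py_alt action_map time_value
instance (action_map : List (Int × List (List (String × String)))) (time_value : Int) (out : String) : Decidable (Spec_action_text_at_time_py action_map time_value out) := by unfold Spec_action_text_at_time_py; infer_instance

-- ===== CLAIM =====
def Claim_equal_action_text_at_time_py : Prop := ∀ (action_map : List (Int × List (List (String × String)))) (time_value : Int), Dom_action_text_at_time_py action_map time_value → Spec_action_text_at_time_py action_map time_value (action_text_at_time_py action_map time_value)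

-- ===== LEMMAS AND PROOFS =====
theorem pvFoldl_eq_map (actions : List (List (String × String))) (acc : List String) :
    actions.foldl (fun msgs action =>
      let target := (pvLookup action "target").getD "?"
      let act := PySem.Str.upper ((pvLookup action "action").getD "")
      let row := pvLookup action "right_of_way"
      match row with
      | some r =>
          if r ≠ "" then msgs ++ [target ++ " -> " ++ act ++ " | ROW=" ++ r]
          else msgs ++ [target ++ " -> " ++ act]
      | none => msgs ++ [target ++ " -> " ++ act]) acc
    = acc ++ actions.map pvFmtB := by
  induction actions generalizing acc with
  | nil => simp
  | cons a as ih =>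
    simp only [List.foldl_cons, List.map_cons, ih]
    unfold pvFmtB
    rcases hrow : pvLookup a "right_of_way" with _ | r <;> simp only [hrow] <;> (try split) <;> simp

theorem join_two (x y : String) : PySem.Str.join " | " [x, y] = x ++ " | " ++ y := by
  rw [← String.toList_inj]
  simp [PySem.Str.join, PySem.Chars.join_cons_cons, PySem.Chars.join_singleton]

theorem join_one (x : String) : PySem.Str.join " | " [x] = x := by
  rw [← String.toList_inj]
  simp [PySem.Str.join, PySem.Chars.join_singleton]

theorem action_text_eq (action_map : List (Int × List (List (String × String)))) (time_value : Int) :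
    action_text_at_time_py action_map time_value = action_text_at_time_py_alt action_map time_value := by
  unfold action_text_at_time_py action_text_at_time_py_alt
  simp only [pvFoldl_eq_map, List.nil_append]
  rcases (pvLookup action_map time_value).getD [] with _ | ⟨a, _ | ⟨b, _ | ⟨c, rs⟩⟩⟩
  · simp
  · simp [join_one]
  · simp [join_two, String.append_assoc]
  · have hslice : PySem.List.slice ((a :: b :: c :: rs).map pvFmtB) none (some 2)
        = [pvFmtB a, pvFmtB b] := by
      rw [show ((2 : Int)) = ((2 : Nat) : Int) from rfl, PySem.List.slice_to_natCast]
      simp [List.take]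
    have hlen : (((a :: b :: c :: rs).map pvFmtB).length : Int) - 2 = (((c :: rs).length : Nat) : Int) := by
      simp
      omega
    simp only [List.map_cons, List.length_cons] at hslice hlen ⊢
    rw [hslice, hlen, join_two]
    simp [String.append_assoc]

-- ===== VERDICT =====
theorem action_text_at_time_py_spec : Claim_equal_action_text_at_time_py := by
  intro am tv _
  unfold Spec_action_text_at_time_py
  exact action_text_eq am tv
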